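-- pv_equiv track=rewrite | github.com/aadigwe/syntax-prosody-CU | features/add_wordlevel.py | func_LCA
-- ===== SOURCE A (Python) =====
-- def func_LCA(list_of_const, sent_list, HEIGHT):
--     '''
--     Return a list of tuples of the Lowest Commeon Ancestor LCA for the current and previous word or S if none
--     '''
--     LCA = []
--     for i in range(len(sent_list)):
--         wd_pair = sent_list[i-1] +' ' + sent_list[i]
--         const_with_wd_pairs = [const for const in list_of_const if wd_pair in const[1]]
--         if const_with_wd_pairs:
--             LCA_tuple = min(const_with_wd_pairs, key=lambda x: len(x[1].split(" ")))
--             tag = LCA_tuple[0]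
--             Height_LCA = LCA_tuple[2]
--             LCA.append((sent_list[i], tag, Height_LCA))
--         else:
--             LCA.append((sent_list[i],'S', HEIGHT-1))
--     return LCA
-- ===== SOURCE B (Python) =====
-- def func_LCA(list_of_const, sent_list, HEIGHT):
--     '''
--     Same LCA list by a different decomposition: the constituents are stably
--     pre-sorted once by ascending token count, the previous-word list (with
--     Python's i-1 wraparound: the last word precedes the first) is built
--     explicitly, and the result is a single map over zip(prevs, sent_list)
--     taking the FIRST sorted constituent containing the pair (early exit).
--     '''
--     by_len = sorted(list_of_const, key=lambda c: len(c[1].split(" ")))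
--
--     def lca(prev, wd):
--         pair = prev + ' ' + wd
--         for c in by_len:
--             if pair in c[1]:
--                 return (wd, c[0], c[2])
--         return (wd, 'S', HEIGHT - 1)
--
--     prevs = [] if not sent_list else [sent_list[-1]] + sent_list[:-1]
--     return [lca(p, w) for p, w in zip(prevs, sent_list)]
-- ===== Notes on version B (the rewrite author's own statement) =====
-- stated objective: alternative
-- what changed: B replaces A's index loop with per-word filter+min() by a one-off stable sort of the constituents by token count, an explicit previous-word rotation list, and a single map over zip(prevs, words) that early-exits at the first containing constituent.
import Mathlib
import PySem

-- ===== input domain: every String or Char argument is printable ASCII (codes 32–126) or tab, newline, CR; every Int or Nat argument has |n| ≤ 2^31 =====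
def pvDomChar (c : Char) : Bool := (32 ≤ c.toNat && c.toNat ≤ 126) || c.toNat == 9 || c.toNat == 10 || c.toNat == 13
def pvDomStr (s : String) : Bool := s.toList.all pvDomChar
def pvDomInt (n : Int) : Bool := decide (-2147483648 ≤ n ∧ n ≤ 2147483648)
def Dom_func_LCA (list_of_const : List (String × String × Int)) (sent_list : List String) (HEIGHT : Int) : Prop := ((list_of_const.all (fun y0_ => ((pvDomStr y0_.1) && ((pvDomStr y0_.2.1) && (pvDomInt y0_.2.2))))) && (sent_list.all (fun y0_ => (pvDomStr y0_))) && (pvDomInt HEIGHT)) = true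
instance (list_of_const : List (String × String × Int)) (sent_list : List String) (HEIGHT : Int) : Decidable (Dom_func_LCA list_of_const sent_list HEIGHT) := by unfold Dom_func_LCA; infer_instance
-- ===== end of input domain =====

-- B sorts the constituents once (stably, by token count), builds the previous-word
-- rotation list explicitly, and maps a first-match lookup over zip(prevs, words),
-- instead of A's index loop with a per-word filter plus min().

-- lambda x: len(x[1].split(" ")) — the key BOTH Pythons sort/minimise by
def pvKey (c : String × String × Int) : Nat :=
  (PySem.Chars.splitOn c.2.1.toList [' ']).length

-- ===== PORT A =====
def func_LCA (list_of_const : List (String × String × Int)) (sent_list : List String) (HEIGHT : Int) : List (String × String × Int) :=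
  (PySem.List.pyRange 0 (sent_list.length : Int) 1).foldl
    (fun LCA i =>
      let wd_pair := (PySem.List.pyGetD sent_list (i - 1) "").toList ++ ' ' :: (PySem.List.pyGetD sent_list i "").toList
      let const_with_wd_pairs := list_of_const.filter (fun c => PySem.Chars.isIn wd_pair c.2.1.toList)
      LCA ++ [match PySem.List.min? const_with_wd_pairs pvKey with
              | some LCA_tuple => (PySem.List.pyGetD sent_list i "", LCA_tuple.1, LCA_tuple.2.2)
              | none => (PySem.List.pyGetD sent_list i "", "S", HEIGHT - 1)]) []

-- ===== PORT B =====
-- helper lca(prev, wd) of Source B: first sorted constituent containing 'prev wd', else S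
def pvLca (by_len : List (String × String × Int)) (HEIGHT : Int) (prev wd : String) : String × String × Int :=
  match by_len.find? (fun c => PySem.Chars.isIn (prev.toList ++ ' ' :: wd.toList) c.2.1.toList) with
  | some c => (wd, c.1, c.2.2)
  | none => (wd, "S", HEIGHT - 1)

def func_LCA_alt (list_of_const : List (String × String × Int)) (sent_list : List String) (HEIGHT : Int) : List (String × String × Int) :=
  let by_len := PySem.List.sorted list_of_const pvKey false
  let prevs : List String :=
    if sent_list = [] then [] else PySem.List.pyGetD sent_list (-1) "" :: sent_list.dropLast
  (prevs.zip sent_list).map (fun pw => pvLca by_len HEIGHT pw.1 pw.2)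

-- ===== PRECONDITION & SPEC =====
def Spec_func_LCA (list_of_const : List (String × String × Int)) (sent_list : List String) (HEIGHT : Int) (out : List (String × String × Int)) : Prop := out = func_LCA_alt list_of_const sent_list HEIGHT
instance (list_of_const : List (String × String × Int)) (sent_list : List String) (HEIGHT : Int) (out : List (String × String × Int)) : Decidable (Spec_func_LCA list_of_const sent_list HEIGHT out) := by unfold Spec_func_LCA; infer_instance

-- ===== CLAIM (what is proved, stated in full; the proofs are below) =====
def Claim_equal_func_LCA : Prop := ∀ (list_of_const : List (String × String × Int)) (sent_list : List String) (HEIGHT : Int), Dom_func_LCA list_of_const sent_list HEIGHT → Spec_func_LCA list_of_const sent_list HEIGHT (func_LCA list_of_const sent_list HEIGHT)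

-- ===== LEMMAS AND PROOFS =====

-- min? over a one-element extension on the right
theorem pv_min?_append_singleton {α κ : Type} [LT κ] [DecidableLT κ]
    (xs : List α) (x : α) (key : α → κ) :
    PySem.List.min? (xs ++ [x]) key =
      (match PySem.List.min? xs key with
       | none => some x
       | some m => if key x < key m then some x else some m) := by
  simp only [PySem.List.min?, List.foldl_append, List.foldl_cons, List.foldl_nil]
  rfl

-- first p-match after a stable sorted insertion, in terms of the old first match
theorem pv_find?_insertBy {α κ : Type} [LinearOrder κ]
    (key : α → κ) (p : α → Bool) (x : α) (s : List α)
    (hs : s.Pairwise (fun a b => key a ≤ key b)) :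
    (PySem.List.insertBy (fun a b => decide (key a < key b)) x s).find? p =
      (match s.find? p with
       | none => if p x then some x else none
       | some m => if p x ∧ key x < key m then some x else some m) := by
  induction s with
  | nil => simp [PySem.List.insertBy]
  | cons y ys ih =>
    have hy : ∀ z ∈ ys, key y ≤ key z := (List.pairwise_cons.mp hs).1
    have hys : ys.Pairwise (fun a b => key a ≤ key b) := (List.pairwise_cons.mp hs).2
    by_cases hxy : key x < key y
    · simp only [PySem.List.insertBy, hxy, decide_true, if_true]
      by_cases hpx : p x = true
      · cases hfy : (y :: ys).find? p with
        | none => simp [hpx]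
        | some m =>
          have hm : m ∈ y :: ys := List.mem_of_find?_eq_some hfy
          have hym : key y ≤ key m := by
            rcases List.mem_cons.mp hm with h | h
            · exact le_of_eq (congrArg key h.symm)
            · exact hy m h
          have : key x < key m := lt_of_lt_of_le hxy hym
          simp [hpx, this]
      · simp only [Bool.not_eq_true] at hpx
        cases hfy : (y :: ys).find? p with
        | none => simp [hpx, hfy]
        | some m => simp [hpx, hfy]
    · simp only [PySem.List.insertBy, hxy, decide_false]
      by_cases hpy : p y = true
      · simp [hpy, hxy]
      · simp only [Bool.not_eq_true] at hpy
        have := ih hys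
        simp only [List.find?_cons, hpy, Bool.false_eq_true, if_false]
        exact this

-- crux 1: first containing constituent of the stably sorted list
-- = min-by-key of the filtered list (Python min keeps the FIRST extremal element)
theorem pv_find?_sorted_eq_min?_filter {α κ : Type} [LinearOrder κ]
    (key : α → κ) (p : α → Bool) (xs : List α) :
    (PySem.List.sorted xs key false).find? p = PySem.List.min? (xs.filter p) key := by
  induction xs using List.reverseRecOn with
  | nil => simp [PySem.List.sorted, PySem.List.min?]
  | append_singleton xs x ih =>
    have hsort : PySem.List.sorted (xs ++ [x]) key false =
        PySem.List.insertBy (fun a b => decide (key a < key b)) x (PySem.List.sorted xs key false) := by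
      rw [PySem.List.sorted_eq_foldl_insertBy, PySem.List.sorted_eq_foldl_insertBy,
        List.foldl_append]
      rfl
    rw [hsort, pv_find?_insertBy key p x _ (PySem.List.sorted_pairwise xs key), ih,
      List.filter_append]
    by_cases hpx : p x = true
    · simp only [List.filter_cons, hpx, List.filter_nil, if_true,
        pv_min?_append_singleton]
      cases hmin : PySem.List.min? (xs.filter p) key with
      | none => simp
      | some m =>
        by_cases hlt : key x < key m
        · simp [hlt]
        · simp [hlt]
    · simp only [Bool.not_eq_true] at hpx
      simp only [List.filter_cons, hpx, Bool.false_eq_true,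
        if_false, List.filter_nil, List.append_nil]
      cases PySem.List.min? (xs.filter p) key <;> rfl

-- crux 2: A's index loop over range(len(sl)), reading sl[i-1] and sl[i],
-- is B's map over zip(rotation, sl)
theorem pv_range_pair_eq_zip_map {β : Type} (sl : List String) (g : String → String → β) :
    (PySem.List.pyRange 0 (sl.length : Int) 1).map
      (fun i => g (PySem.List.pyGetD sl (i - 1) "") (PySem.List.pyGetD sl i "")) =
    ((if sl = [] then [] else PySem.List.pyGetD sl (-1) "" :: sl.dropLast).zip sl).map
      (fun pw => g pw.1 pw.2) := by
  cases hsl : sl with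
  | nil => simp
  | cons a as =>
    have hne : a :: as ≠ [] := by simp
    apply List.ext_getElem
    · simp [PySem.List.length_pyRange_one, List.length_zip,
        List.length_dropLast]
    · intro k h1 h2
      have hk : k < (a :: as).length := by
        simpa [PySem.List.length_pyRange_one] using h1
      simp only [List.getElem_map, PySem.List.getElem_pyRange_one, List.getElem_zip]
      have hzlen : k < ((PySem.List.pyGetD (a :: as) (-1) "" :: (a :: as).dropLast).zip (a :: as)).length := by
        simpa using h2
      congr 1
      · -- previous word: sl[i-1] with Python wraparound = rotation[k]
        cases k with
        | zero =>
          simp only [Int.zero_add]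
          norm_num
          rw [PySem.List.pyGetD_neg_one (a :: as) "" hne]
          simp
        | succ k' =>
          have : (0 : Int) + (k' + 1 : Nat) - 1 = ((k' : Nat) : Int) := by omega
          rw [this, PySem.List.pyGetD_natCast]
          have hk' : k' < (a :: as).dropLast.length := by
            simp only [List.length_dropLast] at *
            omega
          have hk'' : k' < (a :: as).length := by simp at hk ⊢; omega
          simp [List.getD_eq_getElem?_getD, List.getElem?_eq_getElem hk'',
            List.getElem_dropLast]
      · -- current word: sl[i] = sl[k]
        have : (0 : Int) + (k : Nat) = ((k : Nat) : Int) := by push_cast; ring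
        rw [this, PySem.List.pyGetD_natCast]
        simp [List.getD_eq_getElem?_getD, List.getElem?_eq_getElem hk]

-- ===== VERDICT (by name: the statement is the Claim_ definition above) =====
theorem func_LCA_spec : Claim_equal_func_LCA := by
  intro list_of_const sent_list HEIGHT _
  unfold Spec_func_LCA func_LCA func_LCA_alt
  rw [PySem.List.foldl_append_singleton_eq_map]
  simp only [List.nil_append, ← pv_find?_sorted_eq_min?_filter, pvLca]
  exact pv_range_pair_eq_zip_map sent_list
    (fun prev wd =>
      match List.find?
          (fun c => PySem.Chars.isIn (prev.toList ++ ' ' :: wd.toList) c.2.1.toList)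
          (PySem.List.sorted list_of_const pvKey) with
      | some c => (wd, c.1, c.2.2)
      | none => (wd, "S", HEIGHT - 1))
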